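-- pv_equiv track=rewrite | github.com/in-s-ane/sctf-2015-q1 | Cookies-60/not_our_cookie_solution.py | gendp
-- ===== SOURCE A (Python) =====
-- def gendp(x):
-- 	values = {} #it maps the ordered pair (numpieces, prevmove) to 0 (you win if you start the turn on this condition)
-- 		        #and 1 (you win the game if you start the turn on this condition)
-- 	for i in range(0,x+1):
-- 		values[(0,i)]=0 #if you have 0 pieces and its your turn, you autolose
-- 	for i in range(1,50): #m range appears to be 2 through 49
-- 						#so, this is an impartial game (it doesnt matter whose turn it is, you can make the same moves)
-- 						#Say you're in state A. If you can get to a losing state (value of 0) in one move, you'll make that move. That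
-- 						#forces the other player to lose. So if you can get to a losing state, A -> 1, and becomes a winning move
-- 						#If, however, you can't ever get to a losing state in one move, that means no matter what you do, the other
-- 						#player is going to win. So A -> 0
-- 		for j in range(0,x+1): # your prevmove is always in the range 0-k (0 implies starting position)
-- 			#so i = current pilesize
-- 			#j=prevmove
-- 			win=0
-- 			for k in range(1,x+1):
-- 				if(k==j or k>i):
-- 					#you can't make a move here!
-- 					continue
-- 				else:
-- 					if values[(i-k,k)]==0:
-- 						win=1
-- 			values[(i,j)]=win
-- 	return values
-- ===== SOURCE B (Python) =====
-- def gendp(x):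
--     # Summarise each pilesize i by (c, k0): c = number of losing reply moves k
--     # (1 <= k <= min(i, x) with state (i-k, k) losing), k0 = the last such k
--     # (only meaningful when c == 1).  A state (i, j) is then winning iff some
--     # losing move other than j exists, i.e. c >= 2, or c == 1 with j != k0.
--     # The result dict is assembled at the end as a flat list of items.
--     tags = []
--     for i in range(1, 50):
--         c, k0 = 0, 0
--         for k in range(1, min(i, x) + 1):
--             if _is_lose(tags, i - k, k):
--                 c, k0 = c + 1, k
--         tags.append((c, k0))
--     items = [((0, i), 0) for i in range(0, x + 1)]
--     for i in range(1, 50):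
--         c, k0 = tags[i - 1]
--         items += [((i, j), _rowval(c, k0, j)) for j in range(0, x + 1)]
--     return dict(items)
--
-- def _is_lose(tags, i, k):
--     if i == 0:
--         return True
--     c, k0 = tags[i - 1]
--     return c == 0 or (c == 1 and k0 == k)
--
-- def _rowval(c, k0, j):
--     return 1 if (c >= 2 or (c == 1 and j != k0)) else 0
-- ===== Notes on version B (the rewrite author's own statement) =====
-- stated objective: faster
-- what changed: B replaces the dict-building triple loop by a summary pass: each pilesize i is summarised once by (count of losing reply moves, last such move) computed in O(x) from the previous summaries, and the result dict is assembled at the end as a flat item list with each (i,j) value derived in O(1) from the summary, removing A's inner rescan of all k for every j.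
import Mathlib
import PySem

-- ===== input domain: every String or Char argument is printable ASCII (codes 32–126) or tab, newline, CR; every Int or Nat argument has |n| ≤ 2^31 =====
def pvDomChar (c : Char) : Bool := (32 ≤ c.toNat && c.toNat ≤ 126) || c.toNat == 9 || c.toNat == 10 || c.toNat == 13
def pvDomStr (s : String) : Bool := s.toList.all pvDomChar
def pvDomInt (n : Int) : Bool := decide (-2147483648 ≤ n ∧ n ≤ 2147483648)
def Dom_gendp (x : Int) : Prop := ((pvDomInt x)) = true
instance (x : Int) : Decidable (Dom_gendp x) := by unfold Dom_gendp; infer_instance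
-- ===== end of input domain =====

-- B replaces A's dict-building triple loop (for each pilesize i and each prevmove j, rescan
-- all moves k) by a summary pass: each pilesize i is summarised once by (number of losing
-- reply moves, last such move), each summary computed from the earlier summaries alone, and
-- the result dict is assembled at the end as a flat item list with each (i, j) value derived
-- in O(1) from row i's summary.  The Python dict keyed by the pair (pilesize, prevmove) is
-- ported with key [pilesize, prevmove] : List Int and returned as its items list in
-- insertion order (all keys are distinct, so dict(items) keeps exactly that order).

-- ===== PORT A =====
-- values[(0,i)] = 0 for i in range(0, x+1)
def initA (x : Int) : PySem.Dict (List Int) Int :=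
  (PySem.List.pyRange 0 (x + 1) 1).foldl (fun d i => d.insert [0, i] 0) PySem.Dict.empty

-- the inner `for k in range(1, x+1)` loop computing `win` (values[(i-k,k)] is always
-- present when read: the key was inserted on an earlier pilesize; getD 0 is exact there)
def winA (d : PySem.Dict (List Int) Int) (x i j : Int) : Int :=
  (PySem.List.pyRange 1 (x + 1) 1).foldl
    (fun win k =>
      if k = j ∨ i < k then win
      else if d.getD [i - k, k] 0 = 0 then 1 else win) 0

-- the `for j in range(0, x+1)` loop for one pilesize i
def rowA (x : Int) (d : PySem.Dict (List Int) Int) (i : Int) : PySem.Dict (List Int) Int :=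
  (PySem.List.pyRange 0 (x + 1) 1).foldl (fun d j => d.insert [i, j] (winA d x i j)) d

def gendp (x : Int) : List (List Int × Int) :=
  ((PySem.List.pyRange 1 50 1).foldl (rowA x) (initA x)).items

-- ===== PORT B =====
-- _is_lose(tags, i, k): is state (pilesize i, prevmove k) losing, judged from the summaries?
-- (tags[i-1] in Python; the index is always in range at the call sites, so getD is exact)
def isLoseB (tags : List (Int × Int)) (i k : Int) : Bool :=
  if i = 0 then true
  else
    let p := tags.getD (i - 1).toNat (0, 0)
    decide (p.1 = 0 ∨ (p.1 = 1 ∧ p.2 = k))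

-- the inner `for k in range(1, min(i, x) + 1)` loop building row i's summary (c, k0)
def tagOf (x : Int) (tags : List (Int × Int)) (i : Int) : Int × Int :=
  (PySem.List.pyRange 1 (min i x + 1) 1).foldl
    (fun p k => if isLoseB tags (i - k) k then (p.1 + 1, k) else p) (0, 0)

-- `for i in range(1, 50): ... tags.append((c, k0))`
def tagsB (x : Int) : List (Int × Int) :=
  (PySem.List.pyRange 1 50 1).foldl (fun tags i => tags ++ [tagOf x tags i]) []

-- _rowval(c, k0, j)
def rowvalB (c k0 j : Int) : Int := if 2 ≤ c ∨ (c = 1 ∧ j ≠ k0) then 1 else 0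

def gendp_alt (x : Int) : List (List Int × Int) :=
  let tags := tagsB x
  ((PySem.List.pyRange 0 (x + 1) 1).map (fun i => (([0, i] : List Int), (0 : Int))))
  ++ (PySem.List.pyRange 1 50 1).flatMap (fun i =>
      let p := tags.getD (i - 1).toNat (0, 0)
      (PySem.List.pyRange 0 (x + 1) 1).map (fun j => (([i, j] : List Int), rowvalB p.1 p.2 j)))

-- ===== PRECONDITION & SPEC =====
def Spec_gendp (x : Int) (out : List (List Int × Int)) : Prop := out = gendp_alt x
instance (x : Int) (out : List (List Int × Int)) : Decidable (Spec_gendp x out) := by unfold Spec_gendp; infer_instance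

-- ===== CLAIM (what is proved, stated in full; the proofs are below) =====
def Claim_equal_gendp : Prop := ∀ (x : Int), Dom_gendp x → Spec_gendp x (gendp x)

-- ===== LEMMAS AND PROOFS =====

-- the list of losing reply moves from pilesize i, read off A's dict
def losing (d : PySem.Dict (List Int) Int) (x i : Int) : List Int :=
  (PySem.List.pyRange 1 (min i x + 1) 1).filter (fun k => d.getD [i - k, k] 0 = 0)

-- the value A's row i assigns to prevmove j, as a function of `losing`
def bval (losing : List Int) (j : Int) : Int :=
  if 2 ≤ losing.length then 1
  else match losing with
    | [k0] => if j = k0 then 0 else 1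
    | _ => 0

-- A's win-accumulating fold is "1 iff some k passes both tests"
lemma foldwin (l : List Int) (c r : Int → Prop) [DecidablePred c] [DecidablePred r] (w : Int) :
    l.foldl (fun win k => if c k then win else if r k then 1 else win) w
      = if l.any (fun k => decide (¬ c k ∧ r k)) then 1 else w := by
  induction l generalizing w with
  | nil => simp
  | cons a l ih =>
      simp only [List.foldl_cons, List.any_cons, ih]
      by_cases hc : c a <;> by_cases hr : r a <;> simp [hc, hr]

-- `losing` is strictly increasing
lemma losing_pairwise (d : PySem.Dict (List Int) Int) (x i : Int) :
    (losing d x i).Pairwise (· < ·) :=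
  List.Pairwise.filter _ (PySem.List.pairwise_lt_pyRange_one 1 (min i x + 1))

-- membership in losing
lemma mem_losing (d : PySem.Dict (List Int) Int) (x i k : Int) :
    k ∈ losing d x i ↔ (1 ≤ k ∧ k ≤ i ∧ k ≤ x) ∧ d.getD [i - k, k] 0 = 0 := by
  simp only [losing, List.mem_filter, PySem.List.mem_pyRange_one, decide_eq_true_eq]
  constructor
  · rintro ⟨⟨h1, h2⟩, h3⟩; exact ⟨⟨h1, by omega, by omega⟩, h3⟩
  · rintro ⟨⟨h1, h2, h3⟩, h4⟩; exact ⟨⟨h1, by omega⟩, h4⟩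

-- agreement of d' with d off pilesize i
def AgreesOff (i : Int) (d d' : PySem.Dict (List Int) Int) : Prop :=
  ∀ a b : Int, a ≠ i → d'.getD [a, b] 0 = d.getD [a, b] 0

-- A's win equals the value determined by `losing`, for any d' agreeing with d off pilesize i
lemma winA_eq_bval (d d' : PySem.Dict (List Int) Int) (x i j : Int)
    (hag : AgreesOff i d d') :
    winA d' x i j = bval (losing d x i) j := by
  have hfold := foldwin (PySem.List.pyRange 1 (x + 1) 1)
      (fun k => k = j ∨ i < k) (fun k => d'.getD [i - k, k] 0 = 0) 0
  have hany : ((PySem.List.pyRange 1 (x + 1) 1).any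
        (fun k => decide (¬ (k = j ∨ i < k) ∧ d'.getD [i - k, k] 0 = 0)))
      = ((losing d x i).any (fun k => k ≠ j)) := by
    rw [Bool.eq_iff_iff]
    simp only [List.any_eq_true, PySem.List.mem_pyRange_one, decide_eq_true_eq,
      mem_losing, ne_eq]
    constructor
    · rintro ⟨k, ⟨hk1, hk2⟩, ⟨hnj, hval⟩⟩
      rw [not_or] at hnj
      have hne : i - k ≠ i := by omega
      exact ⟨k, ⟨⟨by omega, by omega, by omega⟩, by rw [← hag _ k hne]; exact hval⟩, hnj.1⟩
    · rintro ⟨k, ⟨⟨hk1, hk2, hk3⟩, hval⟩, hnj⟩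
      have hne : i - k ≠ i := by omega
      exact ⟨k, ⟨by omega, by omega⟩, ⟨by rw [not_or]; exact ⟨hnj, by omega⟩, by rw [hag _ k hne]; exact hval⟩⟩
  rw [winA, hfold, hany]
  have hpw := losing_pairwise d x i
  cases hl : losing d x i with
  | nil => simp [bval]
  | cons a t =>
      cases t with
      | nil =>
          by_cases hja : j = a
          · simp [bval, hja]
          · simp [bval, hja, Ne.symm hja]
      | cons b t' =>
          have hab : a ≠ b := by
            rw [hl] at hpw
            exact ne_of_lt (List.rel_of_pairwise_cons hpw (List.mem_cons_self ..))
          have hany2 : ((a :: b :: t').any (fun k => k ≠ j)) = true := by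
            simp only [List.any_cons, ne_eq, Bool.or_eq_true, decide_eq_true_eq]
            by_cases hja : a = j
            · right; left; omega
            · left; exact hja
          rw [hany2]
          simp [bval]

-- the j-loop of A produces the same dict as inserting the fixed row values bval
lemma rowfold_eq (x i : Int) (d : PySem.Dict (List Int) Int) (l : List Int) :
    ∀ d', AgreesOff i d d' →
      l.foldl (fun d'' j => d''.insert [i, j] (winA d'' x i j)) d'
        = l.foldl (fun d'' j => d''.insert [i, j] (bval (losing d x i) j)) d' := by
  induction l with
  | nil => intro d' _; rfl
  | cons j l ih =>
      intro d' hag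
      simp only [List.foldl_cons]
      rw [winA_eq_bval d d' x i j hag]
      apply ih
      intro a b hne
      rw [PySem.Dict.getD_insert]
      have : ([a, b] : List Int) ≠ [i, j] := by
        intro h; injection h with h1 _; exact hne h1
      simp [this, hag a b hne]

lemma rowA_eq (x : Int) (d : PySem.Dict (List Int) Int) (i : Int) :
    rowA x d i
      = (PySem.List.pyRange 0 (x + 1) 1).foldl
          (fun d'' j => d''.insert [i, j] (bval (losing d x i) j)) d :=
  rowfold_eq x i d (PySem.List.pyRange 0 (x + 1) 1) d (fun _ _ _ => rfl)

-- getD through a row-insertion fold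
lemma getD_rowfold (l : List Int) (d : PySem.Dict (List Int) Int) (i a b : Int) (v : Int → Int) :
    (l.foldl (fun d'' j => d''.insert [i, j] (v j)) d).getD [a, b] 0
      = if a = i ∧ b ∈ l then v b else d.getD [a, b] 0 := by
  induction l generalizing d with
  | nil => simp
  | cons j l ih =>
      simp only [List.foldl_cons, ih, PySem.Dict.getD_insert, List.mem_cons]
      by_cases hai : a = i
      · by_cases hbl : b ∈ l
        · simp [hai, hbl]
        · by_cases hbj : b = j
          · subst hai hbj; simp [hbl]
          · have : ([a, b] : List Int) ≠ [i, j] := by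
              intro h; injection h with _ h2; injection h2 with h3 _; exact hbj h3
            simp [hai, hbl, hbj]
      · have : ([a, b] : List Int) ≠ [i, j] := by
          intro h; injection h with h1 _; exact hai h1
        simp [hai, this]

-- B's summary fold counts the passing elements and remembers the last one
lemma tagfold_filter (l : List Int) (q : Int → Bool) (p0 : Int × Int) :
    l.foldl (fun p k => if q k then (p.1 + 1, k) else p) p0
      = (l.filter q).foldl (fun p k => (p.1 + 1, k)) p0 := by
  induction l generalizing p0 with
  | nil => rfl
  | cons a l ih =>
      by_cases hq : q a <;> simp [hq, ih]

lemma tagfold_fst (l : List Int) (p0 : Int × Int) :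
    (l.foldl (fun (p : Int × Int) k => (p.1 + 1, k)) p0).1 = p0.1 + l.length := by
  induction l generalizing p0 with
  | nil => simp
  | cons a l ih => simp [ih]; omega

-- the summary determines bval
lemma rowval_eq_bval (L : List Int) (j : Int) :
    rowvalB (L.foldl (fun (p : Int × Int) k => (p.1 + 1, k)) (0, 0)).1
            (L.foldl (fun (p : Int × Int) k => (p.1 + 1, k)) (0, 0)).2 j
      = bval L j := by
  match L with
  | [] => simp [rowvalB, bval]
  | [a] =>
      simp only [List.foldl_cons, List.foldl_nil, rowvalB, bval]
      by_cases hja : j = a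
      · simp [hja]
      · simp [hja]
  | a :: b :: t =>
      have hc : 2 ≤ (((a :: b :: t).foldl (fun (p : Int × Int) k => (p.1 + 1, k)) (0, 0)).1) := by
        rw [tagfold_fst]; simp; omega
      have hl : 2 ≤ (a :: b :: t).length := by simp
      simp only [rowvalB, bval]
      rw [if_pos (Or.inl hc), if_pos hl]

-- the summary decides "losing" exactly as bval does
lemma tag_iff (L : List Int) (k : Int) :
    ((L.foldl (fun (p : Int × Int) k => (p.1 + 1, k)) (0, 0)).1 = 0
      ∨ ((L.foldl (fun (p : Int × Int) k => (p.1 + 1, k)) (0, 0)).1 = 1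
         ∧ (L.foldl (fun (p : Int × Int) k => (p.1 + 1, k)) (0, 0)).2 = k))
      ↔ bval L k = 0 := by
  have h := rowval_eq_bval L k
  rw [← h]
  set t := L.foldl (fun (p : Int × Int) k => (p.1 + 1, k)) (0, 0) with ht
  simp only [rowvalB]
  constructor
  · rintro (h0 | ⟨h1, h2⟩)
    · have : ¬ (2 ≤ t.1 ∨ (t.1 = 1 ∧ k ≠ t.2)) := by
        rintro (h | ⟨h, _⟩) <;> omega
      simp [this]
    · have : ¬ (2 ≤ t.1 ∨ (t.1 = 1 ∧ k ≠ t.2)) := by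
        rintro (h | ⟨_, hne⟩)
        · omega
        · exact hne h2.symm
      simp [this]
  · intro hz
    by_cases hcond : 2 ≤ t.1 ∨ (t.1 = 1 ∧ k ≠ t.2)
    · simp [hcond] at hz
    · rw [not_or] at hcond
      by_cases h1 : t.1 = 1
      · right
        refine ⟨h1, ?_⟩
        by_contra hne
        exact hcond.2 ⟨h1, fun hk => hne hk.symm⟩
      · left
        have hfst : t.1 = (L.length : Int) := by rw [ht, tagfold_fst]; simp
        omega

-- A's dict after the first n pilesize rows
def dAn (x : Int) (n : Nat) : PySem.Dict (List Int) Int :=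
  (PySem.List.pyRange 1 (1 + (n : Int)) 1).foldl (rowA x) (initA x)

-- B's tags after the first n pilesize rows
def tagsn (x : Int) (n : Nat) : List (Int × Int) :=
  (PySem.List.pyRange 1 (1 + (n : Int)) 1).foldl (fun tags i => tags ++ [tagOf x tags i]) []

-- the item list both sides should have after n rows
def itemsn (x : Int) (n : Nat) : List (List Int × Int) :=
  ((PySem.List.pyRange 0 (x + 1) 1).map (fun i => (([0, i] : List Int), (0 : Int))))
  ++ (PySem.List.pyRange 1 (1 + (n : Int)) 1).flatMap (fun a =>
      (PySem.List.pyRange 0 (x + 1) 1).map (fun j =>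
        (([a, j] : List Int),
         rowvalB ((tagsn x n).getD (a - 1).toNat (0, 0)).1
                 ((tagsn x n).getD (a - 1).toNat (0, 0)).2 j)))

lemma initA_getD (x b : Int) : (initA x).getD [0, b] 0 = 0 := by
  rw [initA]
  have h : ∀ (l : List Int) (d : PySem.Dict (List Int) Int), d.getD [0, b] 0 = 0 →
      (l.foldl (fun d i => d.insert [0, i] 0) d).getD [0, b] 0 = 0 := by
    intro l
    induction l with
    | nil => intro d hd; exact hd
    | cons a l ih =>
        intro d hd
        apply ih
        rw [PySem.Dict.getD_insert]
        split <;> simp [hd]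
  exact h _ _ (by simp)

lemma initA_items (x : Int) :
    (initA x).items = (PySem.List.pyRange 0 (x + 1) 1).map (fun i => (([0, i] : List Int), (0 : Int))) := by
  rw [initA, PySem.Dict.items_foldl_insert_fresh _ (fun i => ([0, i] : List Int)) (fun _ => (0 : Int))]
  · show (PySem.Dict.empty : PySem.Dict (List Int) Int).items ++ _ = _
    rw [show (PySem.Dict.empty : PySem.Dict (List Int) Int).items = [] from rfl, List.nil_append]
  · intro a _; simp [PySem.Dict.contains_empty]
  · exact (PySem.List.nodup_pyRange_one 0 (x + 1)).map (fun a b h => by injection h with _ h2; injection h2)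

-- the invariant carried through the outer loop
lemma inv (x : Int) (n : Nat) :
    (tagsn x n).length = n ∧
    (∀ a b : Int, 0 ≤ a → a ≤ (n : Int) → 1 ≤ b → b ≤ x →
        ((dAn x n).getD [a, b] 0 = 0 ↔ isLoseB (tagsn x n) a b = true)) ∧
    (dAn x n).items = itemsn x n := by
  induction n with
  | zero =>
      have hr : PySem.List.pyRange 1 (1 + ((0 : Nat) : Int)) 1 = [] := by
        norm_num [PySem.List.pyRange_one]
      refine ⟨by rw [tagsn, hr]; rfl, ?_, ?_⟩
      · intro a b ha0 han hb1 hbx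
        have ha : a = 0 := by omega
        subst ha
        rw [dAn, tagsn, hr]
        simp only [List.foldl_nil, isLoseB]
        simp [initA_getD]
      · rw [dAn, itemsn, tagsn, hr]
        simp [initA_items]
  | succ n ih =>
      obtain ⟨hlen, hlose, hitems⟩ := ih
      have hr : PySem.List.pyRange 1 (1 + ((n + 1 : Nat) : Int)) 1
          = PySem.List.pyRange 1 (1 + (n : Int)) 1 ++ [1 + (n : Int)] := by
        have he : (1 + ((n + 1 : Nat) : Int)) = (1 + (n : Int)) + 1 := by push_cast; ring
        rw [he, PySem.List.pyRange_one_succ_right (by omega)]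
      set i : Int := 1 + (n : Int) with hi
      set d := dAn x n with hdd
      set tg := tagsn x n with htgd
      have hd : dAn x (n + 1) = rowA x d i := by
        rw [dAn, hr, List.foldl_append, List.foldl_cons, List.foldl_nil, hdd, dAn]
      have htg : tagsn x (n + 1) = tg ++ [tagOf x tg i] := by
        rw [tagsn, hr, List.foldl_append, List.foldl_cons, List.foldl_nil, htgd, tagsn]
      set L := losing d x i with hL
      have hq : ∀ k ∈ PySem.List.pyRange 1 (min i x + 1) 1,
          isLoseB tg (i - k) k = decide (d.getD [i - k, k] 0 = 0) := by
        intro k hk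
        rw [PySem.List.mem_pyRange_one] at hk
        have h4 : k ≤ x := by omega
        have h := hlose (i - k) k (by omega) (by omega) hk.1 h4
        rw [Bool.eq_iff_iff, decide_eq_true_eq]
        exact h.symm
      have htag : tagOf x tg i = L.foldl (fun (p : Int × Int) k => (p.1 + 1, k)) (0, 0) := by
        rw [tagOf, tagfold_filter, hL, losing, List.filter_congr hq]
      set t := tagOf x tg i with htdef
      have hkey : ∀ (a : Int) (p : List Int × Int), p ∈ itemsn x n → p.1 ≠ [a] ∧ (∀ b : Int, p.1 = [a, b] → 0 ≤ a ∧ a ≤ (n : Int)) := by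
        intro a p hp
        rw [itemsn, List.mem_append] at hp
        rcases hp with hp | hp
        · rw [List.mem_map] at hp
          obtain ⟨c, hc, hpc⟩ := hp
          rw [PySem.List.mem_pyRange_one] at hc
          constructor
          · intro h; rw [← hpc] at h; simp at h
          · intro b hb
            rw [← hpc] at hb
            simp only at hb
            injection hb with h1 _
            omega
        · rw [List.mem_flatMap] at hp
          obtain ⟨c, hc, hpc⟩ := hp
          rw [PySem.List.mem_pyRange_one] at hc
          rw [List.mem_map] at hpc
          obtain ⟨j, hj, hpj⟩ := hpc
          constructor
          · intro h; rw [← hpj] at h; simp at h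
          · intro b hb
            rw [← hpj] at hb
            simp only at hb
            injection hb with h1 _
            omega
      have hfresh : ∀ j ∈ PySem.List.pyRange 0 (x + 1) 1, d.contains ([i, j] : List Int) = false := by
        intro j hj
        by_contra hc
        rw [Bool.not_eq_false, PySem.Dict.contains_iff_mem_keys] at hc
        have : d.keys = d.items.map (·.1) := rfl
        rw [this, hitems, List.mem_map] at hc
        obtain ⟨p, hp, hp1⟩ := hc
        have hgood := (hkey i p hp).2 j hp1
        omega
      have hnodupkeys : ((PySem.List.pyRange 0 (x + 1) 1).map (fun j => ([i, j] : List Int))).Nodup :=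
        (PySem.List.nodup_pyRange_one 0 (x + 1)).map (fun a b h => by simpa using h)
      have hrow : dAn x (n + 1)
          = (PySem.List.pyRange 0 (x + 1) 1).foldl (fun d'' j => d''.insert [i, j] (bval L j)) d := by
        rw [hd, rowA_eq]
      have hgetDt : (tg ++ [t]).getD n (0, 0) = t := by
        rw [List.getD_eq_getElem?_getD, List.getElem?_append_right (by omega), hlen]
        simp
      refine ⟨?_, ?_, ?_⟩
      · rw [htg, List.length_append, hlen]; rfl
      · intro a b ha0 han hb1 hbx
        rw [hrow, getD_rowfold, htg]
        by_cases hai : a = i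
        · have hbmem : b ∈ PySem.List.pyRange 0 (x + 1) 1 := by
            rw [PySem.List.mem_pyRange_one]; omega
          rw [if_pos ⟨hai, hbmem⟩]
          have hne0 : ¬ a = 0 := by omega
          have hidx : (a - 1).toNat = n := by omega
          simp only [isLoseB, if_neg hne0, hidx, hgetDt]
          rw [decide_eq_true_eq, htag]
          exact (tag_iff L b).symm
        · rw [if_neg (by tauto)]
          have han' : a ≤ (n : Int) := by omega
          have h' := hlose a b ha0 han' hb1 hbx
          have heq : isLoseB (tg ++ [t]) a b = isLoseB tg a b := by
            by_cases ha0' : a = 0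
            · simp [isLoseB, ha0']
            · have hlt : (a - 1).toNat < tg.length := by rw [hlen]; omega
              simp only [isLoseB, if_neg ha0']
              rw [List.getD_append _ _ _ _ hlt]
          rw [heq]
          exact h'
      · rw [hrow,
          PySem.Dict.items_foldl_insert_fresh _ (fun j => ([i, j] : List Int)) (fun j => bval L j) d hfresh hnodupkeys,
          hitems, itemsn, itemsn, htg, hr, List.flatMap_append, ← List.append_assoc]
        congr 1
        · congr 1
          apply List.flatMap_congr
          intro a ha
          rw [PySem.List.mem_pyRange_one] at ha
          have hlt : (a - 1).toNat < tg.length := by rw [hlen]; omega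
          rw [List.getD_append _ _ _ _ hlt]
        · simp only [List.flatMap_cons, List.flatMap_nil, List.append_nil]
          apply List.map_congr_left
          intro j _
          have hidx : (i - 1).toNat = n := by omega
          rw [hidx, hgetDt]
          rw [htag] at htdef ⊢
          rw [rowval_eq_bval]

-- ===== VERDICT (by name: the statement is the Claim_ definition above) =====
theorem gendp_spec : Claim_equal_gendp := by
  intro x _
  unfold Spec_gendp
  have h50 : (50 : Int) = 1 + ((49 : Nat) : Int) := by norm_num
  have hA : gendp x = (dAn x 49).items := by rw [gendp, dAn, ← h50]
  have hB : gendp_alt x = itemsn x 49 := by rw [gendp_alt, itemsn, tagsB, tagsn, ← h50]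
  rw [hA, hB]
  exact (inv x 49).2.2
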